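-- pv_equiv track=rewrite | github.com/adampehrson/Kattis | venv/bin/HelpmeGame.py | revblackp
-- ===== SOURCE A (Python) =====
-- def revblackp(lst):
--     x = 8
--     temp = list()
--     while x > 0:
--         for y in lst:
--             if y[1] == str(x):
--                 temp.append(y)
--         x -= 1
--     return temp
-- ===== SOURCE B (Python) =====
-- def revblackp(lst):
--     buckets = {}
--     for y in lst:
--         buckets.setdefault(y[1], []).append(y)
--     out = []
--     for d in "87654321":
--         out += buckets.get(d, [])
--     return out
-- ===== Notes on version B (the rewrite author's own statement) =====
-- stated objective: faster
-- what changed: Replaces A's 8 full rescans of the list (one per digit 8..1) with a single grouping pass into a dict of buckets keyed by y[1], then a fixed concatenation of the '8'..'1' buckets.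
import Mathlib
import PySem

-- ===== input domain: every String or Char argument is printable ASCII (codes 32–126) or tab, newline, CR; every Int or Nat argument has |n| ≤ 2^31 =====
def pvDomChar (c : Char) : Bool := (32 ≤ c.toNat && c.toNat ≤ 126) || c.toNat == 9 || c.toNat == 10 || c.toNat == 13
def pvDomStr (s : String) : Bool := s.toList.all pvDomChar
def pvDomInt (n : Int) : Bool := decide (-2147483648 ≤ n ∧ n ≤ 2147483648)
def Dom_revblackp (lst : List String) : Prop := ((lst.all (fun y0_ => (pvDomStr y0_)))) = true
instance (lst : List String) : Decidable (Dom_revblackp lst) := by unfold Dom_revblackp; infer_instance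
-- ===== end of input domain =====

-- B replaces A's 8 full rescans of the list (one per digit 8..1) by one grouping pass
-- into a dict of buckets keyed by y[1] plus a fixed concatenation of buckets '8'..'1'.

-- y[1] as a one-character string; total helper: Pre_ guarantees the index is in range
-- (Python raises IndexError exactly when it is not, and both programs hit y[1]).
def pySub1 (y : String) : String :=
  match PySem.Str.pyGet? y 1 with
  | some c => String.ofList [c]
  | none => ""

-- ===== PORT A =====
def revblackp (lst : List String) : List String :=
  (PySem.List.pyRange 8 0 (-1)).foldl
    (fun temp x =>
      lst.foldl (fun t y => if pySub1 y == PySem.Int.toStr x then t ++ [y] else t) temp)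
    []

-- ===== PORT B =====
def revblackp_alt (lst : List String) : List String :=
  let buckets : PySem.Dict String (List String) :=
    lst.foldl (fun d y => d.modify (pySub1 y) [] (fun b => b ++ [y])) PySem.Dict.empty
  ("87654321".toList).foldl (fun out d => out ++ buckets.getD (String.ofList [d]) []) []

-- ===== PRECONDITION & SPEC =====
-- Pre_ excludes exactly the inputs on which Python A raises IndexError: some element
-- shorter than 2 characters (y[1] is accessed for every element).
def Pre_revblackp (lst : List String) : Prop := ∀ y ∈ lst, 2 ≤ y.toList.length
instance (lst : List String) : Decidable (Pre_revblackp lst) := by unfold Pre_revblackp; infer_instance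

def pvWitness_revblackp : List String := ["a8", "b1", "c8", "dx"]

def Spec_revblackp (lst : List String) (out : List String) : Prop := out = revblackp_alt lst
instance (lst : List String) (out : List String) : Decidable (Spec_revblackp lst out) := by unfold Spec_revblackp; infer_instance

-- ===== CLAIM (what is proved, stated in full; the proofs are below) =====
def Claim_equal_revblackp : Prop := ∀ (lst : List String), Dom_revblackp lst → Pre_revblackp lst → Spec_revblackp lst (revblackp lst)

-- ===== LEMMAS AND PROOFS =====

-- the bucket of key c collects, in order, exactly the elements whose second char is c
theorem bucket_eq_filter (lst : List String) (c : String) :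
    (lst.foldl (fun d y => d.modify (pySub1 y) [] (fun b => b ++ [y])) PySem.Dict.empty).getD c []
      = lst.filter (fun y => pySub1 y == c) := by
  have h := PySem.Dict.getD_foldl_modify_append (lst.map (fun y => (pySub1 y, y))) PySem.Dict.empty c
  simpa [List.foldl_map, List.filter_map, Function.comp_def, List.map_map, PySem.Dict.getD_empty] using h

-- ===== VERDICT (by name: the statement is the Claim_ definition above) =====
theorem revblackp_spec : Claim_equal_revblackp := by
  intro lst _ _
  unfold Spec_revblackp revblackp revblackp_alt
  rw [show PySem.List.pyRange 8 0 (-1) = [8, 7, 6, 5, 4, 3, 2, 1] from by decide]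
  rw [show "87654321".toList = ['8', '7', '6', '5', '4', '3', '2', '1'] from by decide]
  simp only [List.foldl_cons, List.foldl_nil, PySem.List.foldl_append_if, bucket_eq_filter]
  norm_num [show PySem.Int.toStr 8 = "8" from by decide, show PySem.Int.toStr 7 = "7" from by decide,
    show PySem.Int.toStr 6 = "6" from by decide, show PySem.Int.toStr 5 = "5" from by decide,
    show PySem.Int.toStr 4 = "4" from by decide, show PySem.Int.toStr 3 = "3" from by decide,
    show PySem.Int.toStr 2 = "2" from by decide, show PySem.Int.toStr 1 = "1" from by decide,
    show (String.ofList ['8'] = "8") from rfl, show (String.ofList ['7'] = "7") from rfl,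
    show (String.ofList ['6'] = "6") from rfl, show (String.ofList ['5'] = "5") from rfl,
    show (String.ofList ['4'] = "4") from rfl, show (String.ofList ['3'] = "3") from rfl,
    show (String.ofList ['2'] = "2") from rfl, show (String.ofList ['1'] = "1") from rfl]
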